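-- pv_equiv track=rewrite | github.com/ofirr/clineage-simulation | biallelic.py | invert_calling_assignments
-- ===== SOURCE A (Python) =====
-- def invert_calling_assignments(calling_assignments, average=False):
--
--     ica = dict()
--     for i, ca in calling_assignments:
--         inverted_dict = dict()
--         for allele, slot in calling_assignments[(i, ca)].items():
--             inverted_dict.setdefault(slot, []).append(allele)
--         if average:
--             ica[i] = {k: sum(v) // len(v) for k, v in inverted_dict.items()}
--         else:
--             ica[i] = {k: v[0] for k, v in inverted_dict.items() if len(v) == 1}
--     return ica
-- ===== SOURCE B (Python) =====
-- def _avg_slots(mapping):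
--     sums, counts = {}, {}
--     for allele, slot in mapping.items():
--         sums[slot] = sums.get(slot, 0) + allele
--         counts[slot] = counts.get(slot, 0) + 1
--     return {slot: total // counts[slot] for slot, total in sums.items()}
--
--
-- def _unique_slots(mapping):
--     first, counts = {}, {}
--     for allele, slot in mapping.items():
--         first.setdefault(slot, allele)
--         counts[slot] = counts.get(slot, 0) + 1
--     return {slot: first[slot] for slot, c in counts.items() if c == 1}
--
--
-- def invert_calling_assignments(calling_assignments, average=False):
--     reduce = _avg_slots if average else _unique_slots
--     ica = {}
--     for (i, ca), mapping in calling_assignments.items():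
--         ica[i] = reduce(mapping)
--     return ica
-- ===== Notes on version B (the rewrite author's own statement) =====
-- stated objective: alternative
-- what changed: B replaces A's group-alleles-into-lists-per-slot followed by a reducing dict comprehension (sum//len, or keep singleton lists' head) with a single scan per mapping that maintains scalar per-slot aggregates (running sum and count for average, first allele and count otherwise), and iterates .items() instead of re-looking each key up.
import Mathlib
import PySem

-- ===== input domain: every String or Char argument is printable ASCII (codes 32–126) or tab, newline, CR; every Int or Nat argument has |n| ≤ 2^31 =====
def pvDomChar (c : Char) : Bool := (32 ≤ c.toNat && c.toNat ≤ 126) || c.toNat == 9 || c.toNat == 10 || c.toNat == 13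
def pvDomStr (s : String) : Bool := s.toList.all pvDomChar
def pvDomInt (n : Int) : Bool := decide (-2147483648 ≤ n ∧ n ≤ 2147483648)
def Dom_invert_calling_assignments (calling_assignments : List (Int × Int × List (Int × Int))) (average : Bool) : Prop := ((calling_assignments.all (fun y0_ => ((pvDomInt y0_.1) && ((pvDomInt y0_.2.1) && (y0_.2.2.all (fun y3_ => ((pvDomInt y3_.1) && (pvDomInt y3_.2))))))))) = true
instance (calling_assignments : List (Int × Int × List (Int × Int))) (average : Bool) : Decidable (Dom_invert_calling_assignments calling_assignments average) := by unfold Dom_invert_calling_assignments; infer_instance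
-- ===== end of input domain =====

-- B replaces A's group-into-lists-then-reduce (sum//len, singleton head) with a single scan
-- keeping scalar per-slot aggregates (running sum/count, or first allele/count); same cost, alternative decomposition.

-- ===== PORT A =====
def invert_calling_assignments (calling_assignments : List (Int × Int × List (Int × Int))) (average : Bool) : List (Int × List (Int × Int)) :=
  -- the dict[tuple,dict] parameter, as Python builds it: insertion order, duplicate keys overwrite in place
  let d : PySem.Dict (Int × Int) (PySem.Dict Int Int) :=
    PySem.Dict.ofList (calling_assignments.map (fun e => ((e.1, e.2.1), PySem.Dict.ofList e.2.2)))
  let ica : PySem.Dict Int (PySem.Dict Int Int) :=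
    d.keys.foldl (fun ica k =>
      -- calling_assignments[(i, ca)]: lookup of a key obtained by iterating the same dict — never a KeyError
      let m : PySem.Dict Int Int := (d.get? k).getD PySem.Dict.empty
      let inverted : PySem.Dict Int (List Int) :=
        m.items.foldl (fun dd p => dd.modify p.2 [] (fun v => v ++ [p.1])) PySem.Dict.empty
      if average then
        ica.insert k.1 (PySem.Dict.mk (inverted.items.map (fun kv =>
          (kv.1, PySem.Int.floordiv kv.2.sum (kv.2.length : Int)))))
      else
        ica.insert k.1 (PySem.Dict.mk ((inverted.items.filter (fun kv => kv.2.length == 1)).map (fun kv =>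
          (kv.1, kv.2.headI))))   -- v[0] of a list the filter guarantees nonempty: headI is exact
      ) PySem.Dict.empty
  ica.items.map (fun kv => (kv.1, kv.2.items))

-- ===== PORT B =====
-- B-side helper: average=True reduction — one scan keeping running sum and count per slot
def pvAvgSlots (m : PySem.Dict Int Int) : PySem.Dict Int Int :=
  let sc := m.items.foldl
    (fun (p : PySem.Dict Int Int × PySem.Dict Int Int) a =>
      (p.1.insert a.2 (p.1.getD a.2 0 + a.1), p.2.insert a.2 (p.2.getD a.2 0 + 1)))
    (PySem.Dict.empty, PySem.Dict.empty)
  PySem.Dict.mk (sc.1.items.map (fun kv => (kv.1, PySem.Int.floordiv kv.2 (sc.2.getD kv.1 0))))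

-- B-side helper: average=False reduction — one scan keeping first allele and count per slot
def pvUniqueSlots (m : PySem.Dict Int Int) : PySem.Dict Int Int :=
  let fc := m.items.foldl
    (fun (p : PySem.Dict Int Int × PySem.Dict Int Int) a =>
      (p.1.setdefault a.2 a.1, p.2.insert a.2 (p.2.getD a.2 0 + 1)))
    (PySem.Dict.empty, PySem.Dict.empty)
  PySem.Dict.mk ((fc.2.items.filter (fun kv => kv.2 == (1 : Int))).map (fun kv =>
    (kv.1, fc.1.getD kv.1 0)))   -- first[slot]: counts and first always hold the same slots — never a KeyError

def invert_calling_assignments_alt (calling_assignments : List (Int × Int × List (Int × Int))) (average : Bool) : List (Int × List (Int × Int)) :=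
  let d : PySem.Dict (Int × Int) (PySem.Dict Int Int) :=
    PySem.Dict.ofList (calling_assignments.map (fun e => ((e.1, e.2.1), PySem.Dict.ofList e.2.2)))
  let ica : PySem.Dict Int (PySem.Dict Int Int) :=
    d.items.foldl (fun ica kv =>
      ica.insert kv.1.1 (if average then pvAvgSlots kv.2 else pvUniqueSlots kv.2)) PySem.Dict.empty
  ica.items.map (fun kv => (kv.1, kv.2.items))

-- ===== PRECONDITION & SPEC =====
def Spec_invert_calling_assignments (calling_assignments : List (Int × Int × List (Int × Int))) (average : Bool) (out : List (Int × List (Int × Int))) : Prop := out = invert_calling_assignments_alt calling_assignments average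
instance (calling_assignments : List (Int × Int × List (Int × Int))) (average : Bool) (out : List (Int × List (Int × Int))) : Decidable (Spec_invert_calling_assignments calling_assignments average out) := by unfold Spec_invert_calling_assignments; infer_instance

-- ===== CLAIM (what is proved, stated in full; the proofs are below) =====
def Claim_equal_invert_calling_assignments : Prop := ∀ (calling_assignments : List (Int × Int × List (Int × Int))) (average : Bool), Dom_invert_calling_assignments calling_assignments average → Spec_invert_calling_assignments calling_assignments average (invert_calling_assignments calling_assignments average)

-- ===== LEMMAS AND PROOFS =====

-- the alleles mapped to slot k, in scan order
def pvGroup (l : List (Int × Int)) (k : Int) : List Int :=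
  (l.filter (fun p => p.2 == k)).map (fun p => p.1)

-- a fold updating the two halves of a pair independently splits into two folds
theorem pv_foldl_pair {α β γ : Type} (l : List γ) (g : α → γ → α) (h : β → γ → β) (x : α) (y : β) :
    l.foldl (fun p a => (g p.1 a, h p.2 a)) (x, y) = (l.foldl g x, l.foldl h y) := by
  induction l generalizing x y with
  | nil => rfl
  | cons a l ih => simp [ih]

theorem pv_pair_split_sums (l : List (Int × Int)) :
    l.foldl (fun (p : PySem.Dict Int Int × PySem.Dict Int Int) a =>
        (p.1.insert a.2 (p.1.getD a.2 0 + a.1), p.2.insert a.2 (p.2.getD a.2 0 + 1)))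
      (PySem.Dict.empty, PySem.Dict.empty)
    = (l.foldl (fun dd (a : Int × Int) => dd.insert a.2 (dd.getD a.2 0 + a.1)) PySem.Dict.empty,
       l.foldl (fun dd (a : Int × Int) => dd.insert a.2 (dd.getD a.2 0 + 1)) PySem.Dict.empty) :=
  pv_foldl_pair l (fun (dd : PySem.Dict Int Int) (a : Int × Int) => dd.insert a.2 (dd.getD a.2 0 + a.1))
    (fun (dd : PySem.Dict Int Int) (a : Int × Int) => dd.insert a.2 (dd.getD a.2 0 + 1)) PySem.Dict.empty PySem.Dict.empty

theorem pv_pair_split_first (l : List (Int × Int)) :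
    l.foldl (fun (p : PySem.Dict Int Int × PySem.Dict Int Int) a =>
        (p.1.setdefault a.2 a.1, p.2.insert a.2 (p.2.getD a.2 0 + 1)))
      (PySem.Dict.empty, PySem.Dict.empty)
    = (l.foldl (fun dd (a : Int × Int) => dd.setdefault a.2 a.1) PySem.Dict.empty,
       l.foldl (fun dd (a : Int × Int) => dd.insert a.2 (dd.getD a.2 0 + 1)) PySem.Dict.empty) :=
  pv_foldl_pair l (fun (dd : PySem.Dict Int Int) (a : Int × Int) => dd.setdefault a.2 a.1)
    (fun (dd : PySem.Dict Int Int) (a : Int × Int) => dd.insert a.2 (dd.getD a.2 0 + 1)) PySem.Dict.empty PySem.Dict.empty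

theorem pv_count_map (l : List (Int × Int)) (k : Int) :
    (l.map (fun p => p.2)).count k = (pvGroup l k).length := by
  induction l with
  | nil => rfl
  | cons a l ih => by_cases h : a.2 = k <;> simp [pvGroup, h, ih]

theorem pv_group_cons_self (a : Int × Int) (l : List (Int × Int)) :
    pvGroup (a :: l) a.2 = a.1 :: pvGroup l a.2 := by simp [pvGroup]

theorem pv_group_cons_ne (a : Int × Int) (l : List (Int × Int)) {k : Int} (h : k ≠ a.2) :
    pvGroup (a :: l) k = pvGroup l k := by simp [pvGroup, Ne.symm h]

-- A's inverted_dict: items are the distinct slots in first-appearance order, each with its allele group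
theorem pv_inv_items (l : List (Int × Int)) :
    (l.foldl (fun dd p => dd.modify p.2 [] (fun v => v ++ [p.1])) PySem.Dict.empty).items
      = (PySem.Set.ofList (l.map (fun p => p.2))).map (fun k => (k, pvGroup l k)) := by
  have hkeys : (l.foldl (fun dd p => dd.modify p.2 [] (fun v => v ++ [p.1])) PySem.Dict.empty).keys
      = PySem.Set.ofList (l.map (fun p => p.2)) := by
    have := PySem.Dict.keys_foldl_modify_key (κ := Int) (ν := List Int) l (fun p => p.2) []
      (fun _ p => (fun v => v ++ [p.1])) PySem.Dict.empty
    simpa [PySem.Set.update_nil_left] using this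
  have hnd : (l.foldl (fun dd p => dd.modify p.2 [] (fun v => v ++ [p.1])) PySem.Dict.empty).keys.Nodup :=
    PySem.Dict.nodup_keys_foldl_modify_key l (fun p => p.2) [] (fun _ p => (fun v => v ++ [p.1]))
      PySem.Dict.empty (by simp)
  have hgetD : ∀ k, (l.foldl (fun dd p => dd.modify p.2 [] (fun v => v ++ [p.1])) PySem.Dict.empty).getD k []
      = pvGroup l k := by
    intro k
    have hswap : l.foldl (fun dd p => dd.modify p.2 [] (fun v => v ++ [p.1])) PySem.Dict.empty
        = (l.map Prod.swap).foldl (fun dd p => dd.modify p.1 [] (fun v => v ++ [p.2])) PySem.Dict.empty := by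
      rw [List.foldl_map]; rfl
    rw [hswap, PySem.Dict.getD_foldl_modify_append]
    simp [pvGroup, List.filter_map, Function.comp_def]
  rw [PySem.Dict.items_eq_map_keys _ hnd [], hkeys]
  exact List.map_congr_left (fun k _ => by rw [hgetD])

-- B's running-sum dict: value at k is the sum of k's allele group
theorem pv_sums_getD (l : List (Int × Int)) (d : PySem.Dict Int Int) (k : Int) :
    (l.foldl (fun dd (p : Int × Int) => dd.insert p.2 (dd.getD p.2 0 + p.1)) d).getD k 0
      = d.getD k 0 + (pvGroup l k).sum := by
  induction l generalizing d with
  | nil => simp [pvGroup]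
  | cons a l ih =>
    rw [List.foldl_cons, ih]
    by_cases h : k = a.2
    · subst h
      rw [pv_group_cons_self]
      simp
      ring
    · rw [pv_group_cons_ne a l h, PySem.Dict.getD_insert]
      simp [h]

theorem pv_sums_items (l : List (Int × Int)) :
    (l.foldl (fun dd (p : Int × Int) => dd.insert p.2 (dd.getD p.2 0 + p.1)) PySem.Dict.empty).items
      = (PySem.Set.ofList (l.map (fun p => p.2))).map (fun k => (k, (pvGroup l k).sum)) := by
  have hkeys := PySem.Dict.keys_foldl_insert_key (ν := Int) l (fun p => p.2)
    (fun dd p => dd.getD p.2 0 + p.1) PySem.Dict.empty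
  have hnd := PySem.Dict.nodup_keys_foldl_insert_key (ν := Int) l (fun p => p.2)
    (fun dd p => dd.getD p.2 0 + p.1) PySem.Dict.empty (by simp)
  rw [PySem.Dict.items_eq_map_keys _ hnd 0, hkeys]
  simp only [PySem.Dict.keys_empty, PySem.Set.update_nil_left]
  exact List.map_congr_left (fun k _ => by rw [pv_sums_getD]; simp)

-- B's count dict IS Counter(slots)
theorem pv_counts_eq_counter (l : List (Int × Int)) :
    (l.foldl (fun dd (p : Int × Int) => dd.insert p.2 (dd.getD p.2 0 + 1)) PySem.Dict.empty)
      = PySem.Dict.counter (l.map (fun p => p.2)) := by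
  rw [← PySem.Dict.foldl_insert_getD_add_one_eq_counter, List.foldl_map]

-- B's first-allele dict: lookup at k is the head of k's allele group
theorem pv_first_get? (l : List (Int × Int)) (d : PySem.Dict Int Int) (k : Int) :
    (l.foldl (fun dd (p : Int × Int) => dd.setdefault p.2 p.1) d).get? k
      = (d.get? k).or ((pvGroup l k).head?) := by
  induction l generalizing d with
  | nil => simp [pvGroup]
  | cons a l ih =>
    rw [List.foldl_cons, ih]
    by_cases h : k = a.2
    · subst h
      rw [pv_group_cons_self, PySem.Dict.get?_setdefault_self]
      cases hd : d.get? a.2 <;> simp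
    · rw [pv_group_cons_ne a l h, PySem.Dict.get?_setdefault_of_ne _ _ h]

-- the two reductions agree, average = true
theorem pv_avg_eq (m : PySem.Dict Int Int) :
    PySem.Dict.mk ((m.items.foldl (fun dd p => dd.modify p.2 [] (fun v => v ++ [p.1]))
        PySem.Dict.empty).items.map (fun kv => (kv.1, PySem.Int.floordiv kv.2.sum (kv.2.length : Int))))
      = pvAvgSlots m := by
  simp only [pvAvgSlots, pv_pair_split_sums]
  rw [pv_inv_items, pv_sums_items]
  simp only [List.map_map, pv_counts_eq_counter, PySem.Dict.getD_counter]
  refine congrArg _ (List.map_congr_left (fun k _ => ?_))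
  simp [pv_count_map]

-- the two reductions agree, average = false
theorem pv_unique_eq (m : PySem.Dict Int Int) :
    PySem.Dict.mk (((m.items.foldl (fun dd p => dd.modify p.2 [] (fun v => v ++ [p.1]))
        PySem.Dict.empty).items.filter (fun kv => kv.2.length == 1)).map (fun kv => (kv.1, kv.2.headI)))
      = pvUniqueSlots m := by
  simp only [pvUniqueSlots, pv_pair_split_first]
  rw [pv_inv_items, pv_counts_eq_counter, PySem.Dict.items_counter,
    List.filter_map, List.filter_map]
  simp only [List.map_map]
  have hpred : ∀ k ∈ PySem.Set.ofList (m.items.map (fun p => p.2)),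
      ((fun kv : Int × List Int => kv.2.length == 1) ∘ fun k => (k, pvGroup m.items k)) k
      = ((fun kv : Int × Int => kv.2 == (1 : Int)) ∘
          fun k => (k, ((m.items.map (fun p => p.2)).count k : Int))) k := by
    intro k _
    simp only [Function.comp_apply, pv_count_map]
    have hcast : ∀ n : Nat, ((n : Int) == (1 : Int)) = (n == 1) := fun n => by simp
    exact (hcast _).symm
  rw [List.filter_congr hpred]
  refine congrArg _ (List.map_congr_left (fun k hk => ?_))
  simp only [List.mem_filter, Function.comp_apply, beq_iff_eq] at hk
  have hlen : (pvGroup m.items k).length = 1 := by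
    have := pv_count_map m.items k; omega
  obtain ⟨x, hx⟩ := List.length_eq_one_iff.mp hlen
  have hget : (m.items.foldl (fun dd (p : Int × Int) => dd.setdefault p.2 p.1) PySem.Dict.empty).get? k
      = some x := by
    rw [pv_first_get?, hx]; simp
  simp [PySem.Dict.getD_eq_get?_getD, hget, hx]

-- ===== VERDICT (by name: the statement is the Claim_ definition above) =====
theorem invert_calling_assignments_spec : Claim_equal_invert_calling_assignments := by
  intro cas average _
  unfold Spec_invert_calling_assignments
  simp only [invert_calling_assignments, invert_calling_assignments_alt]
  set d : PySem.Dict (Int × Int) (PySem.Dict Int Int) :=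
    PySem.Dict.ofList (cas.map (fun e => ((e.1, e.2.1), PySem.Dict.ofList e.2.2))) with hd
  have hkeys : d.keys = d.items.map (fun kv => kv.1) := rfl
  rw [hkeys, List.foldl_map]
  refine congrArg _ (congrArg _ (PySem.List.foldl_congr_mem _ _ _ _ (fun acc kv hkv => ?_)))
  have hget : d.get? kv.1 = some kv.2 := by
    have : (kv.1, kv.2) ∈ d.items := by simpa using hkv
    exact PySem.Dict.get?_of_mem_items d this (PySem.Dict.nodup_keys_ofList _)
  rw [hget]
  cases average with
  | true => simp only [if_true]; rw [pv_avg_eq]; rfl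
  | false => simp only [Bool.false_eq_true, if_false]; rw [pv_unique_eq]; rfl
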